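-- pv_equiv track=rewrite | github.com/Kuba7331/Matura | longestCommonStrAsc.py | longestAscSubStr
-- ===== SOURCE A (Python) =====
-- def longestAscSubStr(arr):
--     n = len(arr)
--     max_len = 1  # maksymalna długość podciągu niemalejącego
--     cur_len = 1  # aktualna długość podciągu niemalejącego
--     for i in range(1, n):   # petla przechodzi przez 2-gi element tablicy, do jej konca.
--         if arr[i] > arr[i-1]: # porownujemy liczby miedzy soba, jesli liczba, po prawej stronie jest wieksza od tej po lewej, dodajemy 1 do najdluzszego podciagu rosnacych liczb w tablicy.
--             cur_len += 1
--         else: # sprawdzamy aktualny podciag, jesli jest wiekszy od maksymalnego, to maksymalny przyjmuje wartosc aktualnego, w innym wypadku, aktualna dl. ciagu jest rowna 1.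
--             max_len = max(max_len, cur_len)
--             cur_len = 1
--     max_len = max(max_len, cur_len)  # sprawdzamy ostatni podciąg
--     return max_len
-- ===== SOURCE B (Python) =====
-- def longestAscSubStr(arr):
--     n = len(arr)
--     # run-start indices: 0, plus every i where the ascent breaks; n as end sentinel
--     starts = [0] + [i for i in range(1, n) if arr[i] <= arr[i - 1]] + [n]
--     best = 1
--     prev = starts[0]
--     for s in starts[1:]:
--         if s - prev > best:
--             best = s - prev
--         prev = s
--     return best
-- ===== Notes on version B (the rewrite author's own statement) =====
-- stated objective: alternative
-- what changed: Replaces A's single pass with running (max_len, cur_len) counters by first collecting the run-start boundary indices (plus sentinel n) and then taking the maximum gap between consecutive boundaries.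
import Mathlib
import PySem

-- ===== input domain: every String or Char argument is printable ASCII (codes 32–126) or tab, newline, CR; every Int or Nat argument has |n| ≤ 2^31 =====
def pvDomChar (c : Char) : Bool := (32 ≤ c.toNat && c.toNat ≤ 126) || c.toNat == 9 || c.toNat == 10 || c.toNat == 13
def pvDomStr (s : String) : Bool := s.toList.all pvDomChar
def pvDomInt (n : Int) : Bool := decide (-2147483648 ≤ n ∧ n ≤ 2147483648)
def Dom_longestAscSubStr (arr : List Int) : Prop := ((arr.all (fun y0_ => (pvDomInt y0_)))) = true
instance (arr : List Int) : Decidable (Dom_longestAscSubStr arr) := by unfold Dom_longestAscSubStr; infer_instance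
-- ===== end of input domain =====

-- B replaces A's running (max_len, cur_len) counters by a boundary-index scan: collect run-start
-- indices, then take the maximum gap between consecutive boundaries (objective: alternative).


-- ===== PORT A =====
-- indices produced by 'for i in range(1, n)' are always in range, so pyGetD with default 0 is exact
def longestAscSubStr (arr : List Int) : Int :=
  let n : Int := arr.length
  let st := (PySem.List.pyRange 1 n 1).foldl
    (fun (p : Int × Int) i =>
      if PySem.List.pyGetD arr (i - 1) 0 < PySem.List.pyGetD arr i 0 then (p.1, p.2 + 1)
      else (max p.1 p.2, 1)) (1, 1)
  max st.1 st.2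

-- ===== PORT B =====
def longestAscSubStr_alt (arr : List Int) : Int :=
  let n : Int := arr.length
  let starts : List Int :=
    0 :: (PySem.List.pyRange 1 n 1).filter
      (fun i => decide (PySem.List.pyGetD arr i 0 ≤ PySem.List.pyGetD arr (i - 1) 0)) ++ [n]
  let st := starts.tail.foldl
    (fun (p : Int × Int) s => (if s - p.2 > p.1 then s - p.2 else p.1, s)) (1, starts.headD 0)
  st.1

-- ===== PRECONDITION & SPEC =====
def Spec_longestAscSubStr (arr : List Int) (out : Int) : Prop := out = longestAscSubStr_alt arr
instance (arr : List Int) (out : Int) : Decidable (Spec_longestAscSubStr arr out) := by unfold Spec_longestAscSubStr; infer_instance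

-- ===== CLAIM (what is proved, stated in full; the proofs are below) =====
def Claim_equal_longestAscSubStr : Prop := ∀ (arr : List Int), Dom_longestAscSubStr arr → Spec_longestAscSubStr arr (longestAscSubStr arr)

-- ===== LEMMAS AND PROOFS =====

-- Invariant: after processing range(1,k), A's max_len equals B's running best over the boundaries
-- found so far, and A's cur_len equals k minus the last boundary (B's prev).
theorem pv_inv (arr : List Int) (k : Nat) (hk : 1 ≤ k) :
    (((PySem.List.pyRange 1 (k : Int) 1).foldl
      (fun (p : Int × Int) i =>
        if PySem.List.pyGetD arr (i - 1) 0 < PySem.List.pyGetD arr i 0 then (p.1, p.2 + 1)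
        else (max p.1 p.2, 1)) (1, 1)).1
      = (((PySem.List.pyRange 1 (k : Int) 1).filter
          (fun i => decide (PySem.List.pyGetD arr i 0 ≤ PySem.List.pyGetD arr (i - 1) 0))).foldl
          (fun (p : Int × Int) s => (if s - p.2 > p.1 then s - p.2 else p.1, s)) (1, 0)).1)
    ∧ (((PySem.List.pyRange 1 (k : Int) 1).foldl
      (fun (p : Int × Int) i =>
        if PySem.List.pyGetD arr (i - 1) 0 < PySem.List.pyGetD arr i 0 then (p.1, p.2 + 1)
        else (max p.1 p.2, 1)) (1, 1)).2
      = (k : Int) - (((PySem.List.pyRange 1 (k : Int) 1).filter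
          (fun i => decide (PySem.List.pyGetD arr i 0 ≤ PySem.List.pyGetD arr (i - 1) 0))).foldl
          (fun (p : Int × Int) s => (if s - p.2 > p.1 then s - p.2 else p.1, s)) (1, 0)).2) := by
  induction k with
  | zero => omega
  | succ k ih =>
    by_cases hk1 : 1 ≤ k
    · obtain ⟨ih1, ih2⟩ := ih hk1
      have hsplit : PySem.List.pyRange 1 ((k + 1 : Nat) : Int) 1
          = PySem.List.pyRange 1 (k : Int) 1 ++ [(k : Int)] := by
        push_cast
        exact PySem.List.pyRange_one_succ_right (by exact_mod_cast hk1)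
      rw [hsplit, List.filter_append, List.foldl_append, List.foldl_append]
      by_cases hp : PySem.List.pyGetD arr (k : Int) 0 ≤ PySem.List.pyGetD arr ((k : Int) - 1) 0
      · simp only [List.filter_cons, List.filter_nil, hp, decide_true, if_pos,
          List.foldl_cons, List.foldl_nil]
        rw [if_neg (by omega)]
        constructor
        · rw [ih1, ih2]
          split_ifs <;> omega
        · push_cast; omega
      · simp only [List.filter_cons, List.filter_nil, hp, decide_false,
          Bool.false_eq_true, if_false, List.foldl_cons, List.foldl_nil]
        rw [if_pos (by omega)]
        refine ⟨ih1, ?_⟩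
        push_cast
        omega
    · have hk0 : k = 0 := by omega
      subst hk0
      norm_num [PySem.List.pyRange_one_eq_nil]

-- ===== VERDICT (by name: the statement is the Claim_ definition above) =====
theorem longestAscSubStr_spec : Claim_equal_longestAscSubStr := by
  intro arr _
  unfold Spec_longestAscSubStr longestAscSubStr longestAscSubStr_alt
  cases arr with
  | nil => decide
  | cons a as =>
    obtain ⟨h1, h2⟩ := pv_inv (a :: as) (a :: as).length (by simp)
    simp only [List.cons_append, List.tail_cons, List.headD_cons, List.foldl_append,
      List.foldl_cons, List.foldl_nil]
    rw [h1, h2]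
    split_ifs <;> omega
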